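-- pv_equiv track=rewrite | github.com/KKKKSHI30/Leetcode | OA/Minimize the sum calculated by repeatedly removing any two elements and inserting their sum to the Array.py | getMinSum
-- ===== SOURCE A (Python) =====
-- import heapq
--
-- def getMinSum(arr):
-- 	summ = 0
-- 	heapq.heapify(arr)
-- 	while (len(arr) > 1):
-- 		min1 = arr.pop(0)
-- 		heapq.heapify(arr)
-- 		min2 = arr.pop(0)
-- 		min_total = min1 + min2
-- 		summ += min_total
-- 		arr.append(min_total)
-- 		heapq.heapify(arr)
-- 	return summ
-- ===== SOURCE B (Python) =====
-- def getMinSum(arr):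
--     # One sort + two-queue linear merge (classic Huffman-combining without a heap):
--     # q1 holds the sorted originals, q2 the combined sums (consumed FIFO; it stays
--     # nondecreasing), so each round's two smallest come from the two queue fronts.
--     q1 = sorted(arr)
--     q2 = []
--     i = j = 0
--     total = 0
--
--     def pop_min():
--         nonlocal i, j
--         if j >= len(q2) or (i < len(q1) and q1[i] <= q2[j]):
--             v = q1[i]
--             i += 1
--         else:
--             v = q2[j]
--             j += 1
--         return v
--
--     while (len(q1) - i) + (len(q2) - j) > 1:
--         a = pop_min()
--         b = pop_min()
--         t = a + b
--         total += t
--         q2.append(t)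
--     return total
-- ===== Notes on version B (the rewrite author's own statement) =====
-- stated objective: faster
-- what changed: Replaces the repeated full heapify + pop(0) rounds with one initial sort followed by a linear two-queue merge (sorted originals vs FIFO queue of combined sums, whose fronts always hold the two smallest values).
import Mathlib
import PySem

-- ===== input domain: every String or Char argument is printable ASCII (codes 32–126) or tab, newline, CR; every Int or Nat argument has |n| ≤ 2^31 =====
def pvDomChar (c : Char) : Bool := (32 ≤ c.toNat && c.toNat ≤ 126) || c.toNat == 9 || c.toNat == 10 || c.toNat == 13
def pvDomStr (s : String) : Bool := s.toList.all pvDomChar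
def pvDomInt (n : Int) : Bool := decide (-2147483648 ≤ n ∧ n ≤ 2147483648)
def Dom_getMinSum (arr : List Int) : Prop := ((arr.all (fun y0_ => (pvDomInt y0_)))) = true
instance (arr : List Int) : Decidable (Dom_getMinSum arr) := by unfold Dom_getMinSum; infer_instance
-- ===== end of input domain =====

-- B replaces A's repeated full heapify + pop(0) rounds by one sort followed by a
-- linear two-queue merge (objective: faster). A mutates its argument in place
-- (heapify/pop/append); the equivalence proved here is about the RETURN value only.

-- ===== PORT A =====
-- heapq.heapify is a library call; A only ever reads the heapified list at index 0
-- (pop(0)), which is the minimum. It is ported by that contract: the (first)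
-- minimum moved to the front, the remaining elements kept; the tail's internal
-- order is immaterial because every subsequent read is again preceded by heapify.
def pyMinFront (xs : List Int) : List Int :=
  match PySem.List.min? xs (fun x => x) with
  | none => []
  | some m => m :: xs.erase m

theorem length_pyMinFront (xs : List Int) : (pyMinFront xs).length = xs.length := by
  unfold pyMinFront
  cases h : PySem.List.min? xs (fun x => x) with
  | none => rw [(PySem.List.min?_eq_none_iff xs (fun x => x)).mp h]
  | some m =>
    have hm : m ∈ xs := PySem.List.min?_mem h
    have hne : xs.length ≠ 0 := by
      intro h0; rw [List.length_eq_zero_iff] at h0; subst h0; simp at hm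
    simp only [List.length_cons, List.length_erase_of_mem hm]
    omega

def loopA (arr : List Int) (summ : Int) : Int :=
  if 1 < arr.length then
    match arr with
    | [] => summ
    | m1 :: rest =>
      match h : pyMinFront rest with
      | [] => summ
      | m2 :: rest2 => loopA (pyMinFront (rest2 ++ [m1 + m2])) (summ + (m1 + m2))
  else summ
termination_by arr.length
decreasing_by
  have h1 := length_pyMinFront (rest2 ++ [m1 + m2])
  have h2 := length_pyMinFront rest
  rw [h] at h2
  simp_all

def getMinSum (arr : List Int) : Int := loopA (pyMinFront arr) 0

-- ===== PORT B =====
-- Source B's pop_min: takes the smaller front of the two queues (q1 preferred on ties);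
-- index pointers i/j into the immutable lists are modelled by consuming the lists
-- from the front.
def popMin : List Int → List Int → Int × List Int × List Int
  | a :: t1, b :: t2 => if a ≤ b then (a, t1, b :: t2) else (b, a :: t1, t2)
  | a :: t1, [] => (a, t1, [])
  | [], b :: t2 => (b, ([] : List Int), t2)
  | [], [] => (0, [], [])  -- unreachable under the loop guard (Python would raise IndexError)

theorem popMin_length (q1 q2 : List Int) (h : 0 < q1.length + q2.length) :
    (popMin q1 q2).2.1.length + (popMin q1 q2).2.2.length + 1 = q1.length + q2.length := by
  match q1, q2 with
  | a :: t1, b :: t2 => simp [popMin]; split <;> simp <;> omega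
  | a :: t1, [] => simp [popMin]
  | [], b :: t2 => simp [popMin]
  | [], [] => simp at h

def loopB (q1 q2 : List Int) (total : Int) : Int :=
  if 1 < q1.length + q2.length then
    match h1 : popMin q1 q2 with
    | (a, q1a, q2a) =>
      match h2 : popMin q1a q2a with
      | (b, q1b, q2b) => loopB q1b (q2b ++ [a + b]) (total + (a + b))
  else total
termination_by q1.length + q2.length
decreasing_by
  have l1 := popMin_length q1 q2 (by omega)
  rw [h1] at l1; simp at l1
  have l2 := popMin_length q1a q2a (by omega)
  rw [h2] at l2; simp at l2
  simp; omega

def getMinSum_alt (arr : List Int) : Int :=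
  loopB (PySem.List.sorted arr (fun x => x)) [] 0

-- ===== PRECONDITION & SPEC =====
def Spec_getMinSum (arr : List Int) (out : Int) : Prop := out = getMinSum_alt arr
instance (arr : List Int) (out : Int) : Decidable (Spec_getMinSum arr out) := by unfold Spec_getMinSum; infer_instance

-- ===== CLAIM (what is proved, stated in full; the proofs are below) =====
def Claim_equal_getMinSum : Prop := ∀ (arr : List Int), Dom_getMinSum arr → Spec_getMinSum arr (getMinSum arr)

-- ===== LEMMAS AND PROOFS =====

-- Reference computation: repeatedly combine the two smallest of a SORTED list,
-- re-inserting the sum in order. Both ports are reduced to this.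
def G : List Int → Int → Int
  | a :: b :: t, s => G (List.orderedInsert (· ≤ ·) (a + b) t) (s + (a + b))
  | _, s => s
termination_by l _ => l.length
decreasing_by simp [List.orderedInsert_length]

def sortedL (xs : List Int) : List Int := PySem.List.sorted xs (fun x => x)

theorem G_short (l : List Int) (s : Int) (h : l.length ≤ 1) : G l s = s := by
  match l with
  | [] => simp [G]
  | [x] => simp [G]
  | x :: y :: t => simp at h

theorem sortedL_cons_of_min (xs rest : List Int) (m : Int)
    (hperm : xs.Perm (m :: rest)) (hmin : ∀ y ∈ rest, m ≤ y) :
    sortedL xs = m :: sortedL rest := by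
  unfold sortedL
  refine PySem.List.sorted_id_eq_of_perm_of_pairwise xs (m :: PySem.List.sorted rest (fun x => x)) ?_ ?_
  · exact (List.Perm.cons m (PySem.List.sorted_perm rest (fun x => x) false)).trans hperm.symm
  · refine List.pairwise_cons.mpr ⟨?_, PySem.List.sorted_pairwise rest (fun x => x)⟩
    intro y hy
    exact hmin y ((PySem.List.mem_sorted rest (fun x => x) false y).mp hy)

theorem sortedL_append_singleton (l : List Int) (x : Int) :
    sortedL (l ++ [x]) = List.orderedInsert (· ≤ ·) x (sortedL l) := by
  unfold sortedL
  refine PySem.List.sorted_id_eq_of_perm_of_pairwise _ _ ?_ ?_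
  · exact (List.perm_orderedInsert _ x _).trans
      ((List.Perm.cons x (PySem.List.sorted_perm l (fun x => x) false)).trans
        (List.perm_append_singleton x l).symm)
  · exact List.Pairwise.orderedInsert x _ (PySem.List.sorted_pairwise l (fun x => x))

-- ---- A-side ----

theorem min?_some_of_ne_nil (xs : List Int) (h : xs ≠ []) :
    ∃ m, PySem.List.min? xs (fun x => x) = some m := by
  cases hm : PySem.List.min? xs (fun x => x) with
  | none => exact absurd ((PySem.List.min?_eq_none_iff xs (fun x => x)).mp hm) h
  | some m => exact ⟨m, rfl⟩

theorem loopA_eq_G : ∀ n (xs : List Int), xs.length = n → ∀ s,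
    loopA (pyMinFront xs) s = G (sortedL xs) s := by
  intro n
  induction n using Nat.strong_induction_on with
  | _ n ih =>
    intro xs hlen s
    by_cases hbig : 1 < xs.length
    · -- extract the two minima
      obtain ⟨m1, hm1⟩ := min?_some_of_ne_nil xs (by intro h0; subst h0; simp at hbig)
      have hmem1 : m1 ∈ xs := PySem.List.min?_mem hm1
      have hpf1 : pyMinFront xs = m1 :: xs.erase m1 := by unfold pyMinFront; rw [hm1]
      have hrlen : (xs.erase m1).length = xs.length - 1 := List.length_erase_of_mem hmem1
      obtain ⟨m2, hm2⟩ := min?_some_of_ne_nil (xs.erase m1)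
        (by intro h0; rw [h0] at hrlen; simp at hrlen; omega)
      have hmem2 : m2 ∈ xs.erase m1 := PySem.List.min?_mem hm2
      have hpf2 : pyMinFront (xs.erase m1) = m2 :: (xs.erase m1).erase m2 := by
        unfold pyMinFront; rw [hm2]
      have hrlen2 : ((xs.erase m1).erase m2).length = (xs.erase m1).length - 1 :=
        List.length_erase_of_mem hmem2
      have step : loopA (pyMinFront xs) s
          = loopA (pyMinFront ((xs.erase m1).erase m2 ++ [m1 + m2])) (s + (m1 + m2)) := by
        rw [hpf1, loopA, if_pos (by simp only [List.length_cons, hrlen]; omega)]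
        split
        · next heq => rw [hpf2] at heq; cases heq
        · next m2' rest2' heq =>
          rw [hpf2] at heq
          injection heq with e1 e2
          rw [← e1, ← e2]
      rw [step,
        ih (((xs.erase m1).erase m2).length + 1) (by omega) _ (by simp) (s + (m1 + m2))]
      have e1 : sortedL xs = m1 :: sortedL (xs.erase m1) := by
        refine sortedL_cons_of_min xs (xs.erase m1) m1 (List.perm_cons_erase hmem1) ?_
        intro y hy
        exact PySem.List.min?_isMin hm1 y (List.erase_subset hy)
      have e2 : sortedL (xs.erase m1) = m2 :: sortedL ((xs.erase m1).erase m2) := by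
        refine sortedL_cons_of_min _ _ m2 (List.perm_cons_erase hmem2) ?_
        intro y hy
        exact PySem.List.min?_isMin hm2 y (List.erase_subset hy)
      rw [e1, e2, G, sortedL_append_singleton]
    · have hA : loopA (pyMinFront xs) s = s := by
        rw [loopA.eq_def, if_neg (by rw [length_pyMinFront]; omega)]
      have hG : G (sortedL xs) s = s :=
        G_short _ _ (by unfold sortedL; rw [PySem.List.length_sorted]; omega)
      rw [hA, hG]

-- ---- B-side invariant ----

-- Wit ctx q2: every queued sum x ∈ q2 is p + q with p ≤ q and q below everything
-- that was still available when x was queued (current q1 plus the queue prefix).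
def Wit : List Int → List Int → Prop
  | _, [] => True
  | ctx, x :: r => (∃ p q, x = p + q ∧ p ≤ q ∧ ∀ y ∈ ctx, q ≤ y) ∧ Wit (ctx ++ [x]) r

theorem Wit_mono : ∀ (r ctx ctx' : List Int), Wit ctx r → (∀ y ∈ ctx', y ∈ ctx) → Wit ctx' r := by
  intro r
  induction r with
  | nil => intro _ _ _ _; trivial
  | cons x r ih =>
    intro ctx ctx' hw hsub
    obtain ⟨⟨p, q, hx, hpq, hq⟩, hrest⟩ := hw
    refine ⟨⟨p, q, hx, hpq, fun y hy => hq y (hsub y hy)⟩, ?_⟩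
    exact ih (ctx ++ [x]) (ctx' ++ [x]) hrest (by
      intro y hy; rcases List.mem_append.mp hy with h | h
      · exact List.mem_append.mpr (Or.inl (hsub y h))
      · exact List.mem_append.mpr (Or.inr h))

theorem wit_le : ∀ (r ctx : List Int) (x : Int), Wit ctx r → x ∈ r →
    ∃ p q, x = p + q ∧ p ≤ q ∧ ∀ y ∈ ctx, q ≤ y := by
  intro r
  induction r with
  | nil => intro _ _ _ hx; simp at hx
  | cons z r ih =>
    intro ctx x hw hx
    obtain ⟨hz, hrest⟩ := hw
    rcases List.mem_cons.mp hx with rfl | hx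
    · exact hz
    · obtain ⟨p, q, h1, h2, h3⟩ := ih (ctx ++ [z]) x hrest hx
      exact ⟨p, q, h1, h2, fun y hy => h3 y (List.mem_append.mpr (Or.inl hy))⟩

theorem Wit_append : ∀ (r ctx : List Int) (t : Int), Wit ctx r →
    (∃ p q, t = p + q ∧ p ≤ q ∧ ∀ y ∈ ctx ++ r, q ≤ y) → Wit ctx (r ++ [t]) := by
  intro r
  induction r with
  | nil =>
    intro ctx t _ h
    obtain ⟨p, q, h1, h2, h3⟩ := h
    exact ⟨⟨p, q, h1, h2, fun y hy => h3 y (by simpa using hy)⟩, trivial⟩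
  | cons z r ih =>
    intro ctx t hw ht
    obtain ⟨hz, hrest⟩ := hw
    obtain ⟨p, q, h1, h2, h3⟩ := ht
    refine ⟨hz, ih (ctx ++ [z]) t hrest ⟨p, q, h1, h2, ?_⟩⟩
    intro y hy
    apply h3
    simp only [List.append_assoc, List.mem_append, List.mem_cons] at hy ⊢
    tauto

theorem popMin_spec (q1 q2 : List Int) (a : Int) (r1 r2 : List Int)
    (h : popMin q1 q2 = (a, r1, r2)) (h0 : q1 ++ q2 ≠ [])
    (s1 : List.Pairwise (· ≤ ·) q1) (s2 : List.Pairwise (· ≤ ·) q2) :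
    (q1 ++ q2).Perm (a :: (r1 ++ r2)) ∧ (∀ y ∈ r1 ++ r2, a ≤ y) ∧
      List.Pairwise (· ≤ ·) r1 ∧ List.Pairwise (· ≤ ·) r2 ∧ (∀ y ∈ r1, y ∈ q1) := by
  match q1, q2 with
  | [], [] => simp at h0
  | a1 :: t1, [] =>
    simp only [popMin] at h
    obtain ⟨rfl, rfl, rfl⟩ := Prod.mk.injEq .. ▸ h
    obtain ⟨hh, ht⟩ := List.pairwise_cons.mp s1
    refine ⟨by simp, ?_, ht, List.Pairwise.nil, fun y hy => List.mem_cons_of_mem _ hy⟩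
    intro y hy; simp at hy; exact hh y hy
  | [], b1 :: t2 =>
    simp only [popMin] at h
    obtain ⟨rfl, rfl, rfl⟩ := Prod.mk.injEq .. ▸ h
    obtain ⟨hh, ht⟩ := List.pairwise_cons.mp s2
    exact ⟨by simp, by simpa using hh, List.Pairwise.nil, ht, by simp⟩
  | a1 :: t1, b1 :: t2 =>
    obtain ⟨h1a, t1p⟩ := List.pairwise_cons.mp s1
    obtain ⟨h2a, t2p⟩ := List.pairwise_cons.mp s2
    by_cases hle : a1 ≤ b1
    · rw [show popMin (a1 :: t1) (b1 :: t2) = (a1, t1, b1 :: t2) by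
        simp [popMin, hle]] at h
      obtain ⟨rfl, rfl, rfl⟩ := Prod.mk.injEq .. ▸ h
      refine ⟨by simp, ?_, t1p, s2, by intro y hy; exact List.mem_cons_of_mem _ hy⟩
      intro y hy
      rcases List.mem_append.mp hy with hy | hy
      · exact h1a y hy
      · rcases List.mem_cons.mp hy with rfl | hy
        · exact hle
        · exact le_trans hle (h2a y hy)
    · rw [show popMin (a1 :: t1) (b1 :: t2) = (b1, a1 :: t1, t2) by
        simp [popMin, hle]] at h
      obtain ⟨rfl, rfl, rfl⟩ := Prod.mk.injEq .. ▸ h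
      have hb1 : b1 ≤ a1 := le_of_not_ge hle
      refine ⟨?_, ?_, s1, t2p, fun y hy => hy⟩
      · exact List.perm_middle
      · intro y hy
        rcases List.mem_append.mp hy with hy | hy
        · rcases List.mem_cons.mp hy with rfl | hy
          · exact hb1
          · exact le_trans hb1 (h1a y hy)
        · exact h2a y hy

theorem popMin_wit (ctx q1 q2 : List Int) (a : Int) (r1 r2 : List Int)
    (h : popMin q1 q2 = (a, r1, r2)) (h0 : q1 ++ q2 ≠ [])
    (hq : ∀ y ∈ q1, y ∈ ctx) (hw : Wit ctx q2) :
    Wit (ctx ++ [a]) r2 ∧ (∀ y ∈ r1, y ∈ ctx ++ [a]) := by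
  have memapp : ∀ (y : Int) (l : List Int) (z : Int), y ∈ l → y ∈ l ++ [z] := by
    intro y l z hy; exact List.mem_append.mpr (Or.inl hy)
  match q1, q2 with
  | [], [] => simp at h0
  | a1 :: t1, [] =>
    simp only [popMin] at h
    obtain ⟨rfl, rfl, rfl⟩ := Prod.mk.injEq .. ▸ h
    exact ⟨trivial, fun y hy => memapp y ctx a1 (hq y (List.mem_cons_of_mem _ hy))⟩
  | [], b1 :: t2 =>
    simp only [popMin] at h
    obtain ⟨rfl, rfl, rfl⟩ := Prod.mk.injEq .. ▸ h
    exact ⟨hw.2, by simp⟩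
  | a1 :: t1, b1 :: t2 =>
    by_cases hle : a1 ≤ b1
    · rw [show popMin (a1 :: t1) (b1 :: t2) = (a1, t1, b1 :: t2) by
        simp [popMin, hle]] at h
      obtain ⟨rfl, rfl, rfl⟩ := Prod.mk.injEq .. ▸ h
      constructor
      · refine Wit_mono _ ctx (ctx ++ [a1]) hw ?_
        intro y hy
        rcases List.mem_append.mp hy with hy | hy
        · exact hy
        · rw [List.mem_singleton.mp hy]; exact hq a1 List.mem_cons_self
      · exact fun y hy => memapp y ctx a1 (hq y (List.mem_cons_of_mem _ hy))
    · rw [show popMin (a1 :: t1) (b1 :: t2) = (b1, a1 :: t1, t2) by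
        simp [popMin, hle]] at h
      obtain ⟨rfl, rfl, rfl⟩ := Prod.mk.injEq .. ▸ h
      exact ⟨hw.2, fun y hy => memapp y ctx b1 (hq y hy)⟩

theorem loopB_eq_G : ∀ n (q1 q2 : List Int), q1.length + q2.length = n →
    List.Pairwise (· ≤ ·) q1 → List.Pairwise (· ≤ ·) q2 → Wit q1 q2 → ∀ s,
    loopB q1 q2 s = G (sortedL (q1 ++ q2)) s := by
  intro n
  induction n using Nat.strong_induction_on with
  | _ n ih =>
    intro q1 q2 hlen s1 s2 hw s
    by_cases hn : 1 < q1.length + q2.length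
    · rw [loopB, if_pos hn]
      split
      next a q1a q2a h1 =>
      split
      next b q1b q2b h2 =>
      have hne1 : q1 ++ q2 ≠ [] := by
        intro h0
        have := congrArg List.length h0
        simp only [List.length_append, List.length_nil] at this; omega
      obtain ⟨perm1, amin, s1a, s2a, sub1⟩ := popMin_spec q1 q2 a q1a q2a h1 hne1 s1 s2
      have hlen1 : q1a.length + q2a.length + 1 = q1.length + q2.length := by
        have := perm1.length_eq; simp at this; omega
      have hne2 : q1a ++ q2a ≠ [] := by
        intro h0
        have := congrArg List.length h0
        simp only [List.length_append, List.length_nil] at this; omega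
      obtain ⟨perm2, bmin, s1b, s2b, sub2⟩ := popMin_spec q1a q2a b q1b q2b h2 hne2 s1a s2a
      have hlen2 : q1b.length + q2b.length + 1 = q1a.length + q2a.length := by
        have := perm2.length_eq; simp at this; omega
      -- Wit bookkeeping through the two pops
      obtain ⟨w1, wsub1⟩ := popMin_wit q1 q1 q2 a q1a q2a h1 hne1 (fun y hy => hy) hw
      obtain ⟨w2, wsub2⟩ := popMin_wit (q1 ++ [a]) q1a q2a b q1b q2b h2 hne2 wsub1 w1
      have hab : a ≤ b := amin b (by
        have : b ∈ b :: (q1b ++ q2b) := List.mem_cons_self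
        exact (perm2.mem_iff).mpr this)
      -- every queued sum still in q2b is at most a + b
      have hq2b_le : ∀ x ∈ q2b, x ≤ a + b := by
        intro x hx
        obtain ⟨p, q, hx1, hx2, hx3⟩ := wit_le q2b ((q1 ++ [a]) ++ [b]) x w2 hx
        have hqa : q ≤ a := hx3 a (by simp)
        have hqb : q ≤ b := hx3 b (by simp)
        omega
      -- invariants for the next state
      have s2b' : List.Pairwise (· ≤ ·) (q2b ++ [a + b]) := by
        rw [List.pairwise_append]
        refine ⟨s2b, by simp, fun x hx y hy => by
          rw [List.mem_singleton.mp hy]; exact hq2b_le x hx⟩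
      have hwb : Wit q1b (q2b ++ [a + b]) := by
        refine Wit_append q2b q1b (a + b) ?_ ⟨a, b, rfl, hab, ?_⟩
        · refine Wit_mono q2b ((q1 ++ [a]) ++ [b]) q1b w2 ?_
          exact fun y hy => wsub2 y hy
        · intro y hy; exact bmin y hy
      rw [ih (q1b.length + (q2b ++ [a + b]).length) (by simp; omega) q1b (q2b ++ [a + b])
        rfl s1b s2b' hwb (s + (a + b))]
      -- rewrite the sorted list of the whole multiset as a :: b :: sorted rest
      have esort : sortedL (q1 ++ q2) = a :: b :: sortedL (q1b ++ q2b) := by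
        unfold sortedL
        refine PySem.List.sorted_id_eq_of_perm_of_pairwise _ _ ?_ ?_
        · refine List.Perm.trans ?_ perm1.symm
          refine List.Perm.cons a ?_
          refine List.Perm.trans ?_ perm2.symm
          exact List.Perm.cons b (PySem.List.sorted_perm _ _ false)
        · refine List.pairwise_cons.mpr ⟨?_, List.pairwise_cons.mpr ⟨?_, ?_⟩⟩
          · intro y hy
            rcases List.mem_cons.mp hy with rfl | hy
            · exact hab
            · have : y ∈ q1b ++ q2b := (PySem.List.mem_sorted _ _ false y).mp hy
              exact amin y (perm2.symm.subset (List.mem_cons_of_mem _ this))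
          · intro y hy
            exact bmin y ((PySem.List.mem_sorted _ _ false y).mp hy)
          · exact PySem.List.sorted_pairwise _ _
      rw [esort, G, ← List.append_assoc, sortedL_append_singleton]
    · rw [loopB.eq_def, if_neg hn]
      exact (G_short _ _ (by unfold sortedL; rw [PySem.List.length_sorted]; simp; omega)).symm

-- ===== VERDICT (by name: the statement is the Claim_ definition above) =====
theorem getMinSum_spec : Claim_equal_getMinSum := by
  intro arr _
  unfold Spec_getMinSum getMinSum getMinSum_alt
  show loopA (pyMinFront arr) 0 = loopB (sortedL arr) [] 0
  rw [loopA_eq_G arr.length arr rfl 0]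
  rw [loopB_eq_G (sortedL arr).length (sortedL arr) [] (by simp)
    (PySem.List.sorted_pairwise arr (fun x => x)) List.Pairwise.nil trivial 0]
  rw [List.append_nil]
  show G (sortedL arr) 0 = G (sortedL (sortedL arr)) 0
  unfold sortedL
  rw [PySem.List.sorted_sorted]
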